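-- pv_equiv track=rewrite | github.com/ysparrk/Algorithm | 프로그래머스/lv3/64064. 불량 사용자/불량 사용자.py | solution
-- ===== SOURCE A (Python) =====
-- def check(user, banned):
--     if len(user) != len(banned):
--         return False
--     else:
--         for i in range(len(user)):
--             if banned[i] == '*':
--                 pass
--             elif user[i] != banned[i]:
--                 return False
--     return True
--
-- def dfs(sub, v, visited, stack):
--     if v == len(sub):
--         stack.add(tuple(visited))
--         return
--
--     for i in sub[v]:
--         if not visited[i]:
--             visited[i] = 1
--             dfs(sub, v + 1, visited, stack)
--             visited[i] = 0
--         else: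
--             continue
--
-- def solution(user_id, banned_id):
--     # 1) sub 만들기
--     sub = []
--     for i in range(len(banned_id)):
--         temp = []
--         for j in range(len(user_id)):
--             if check(user_id[j], banned_id[i]):
--                 temp.append(j)
--         sub.append(temp)
--
--     # 2) dfs
--     stack = set()
--     visited = [0] * len(user_id)
--     dfs(sub, 0, visited, stack)
--     ans = len(stack)
--     return ans
-- ===== SOURCE B (Python) =====
-- def matches(user, banned):
--     return len(user) == len(banned) and all(
--         bc == '*' or uc == bc for uc, bc in zip(user, banned))
--
--
-- def solution(user_id, banned_id):
--     subs = [[j for j, u in enumerate(user_id) if matches(u, b)] for b in banned_id]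
--     # level-by-level product with pruning: every partial combo keeps distinct indices
--     combos = [()]
--     for cand in subs:
--         combos = [c + (j,) for c in combos for j in cand if j not in c]
--     # an injective combo is identified by its index set -> canonical sorted tuple
--     return len({tuple(sorted(c)) for c in combos})
-- ===== Notes on version B (the rewrite author's own statement) =====
-- stated objective: alternative
-- what changed: Replaces A's recursive DFS backtracking over a shared visited bit-array (collecting visited tuples in a set) with a level-by-level product that builds all injective partial assignments by list comprehension and deduplicates them by canonical sorted index tuple.
import Mathlib
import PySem

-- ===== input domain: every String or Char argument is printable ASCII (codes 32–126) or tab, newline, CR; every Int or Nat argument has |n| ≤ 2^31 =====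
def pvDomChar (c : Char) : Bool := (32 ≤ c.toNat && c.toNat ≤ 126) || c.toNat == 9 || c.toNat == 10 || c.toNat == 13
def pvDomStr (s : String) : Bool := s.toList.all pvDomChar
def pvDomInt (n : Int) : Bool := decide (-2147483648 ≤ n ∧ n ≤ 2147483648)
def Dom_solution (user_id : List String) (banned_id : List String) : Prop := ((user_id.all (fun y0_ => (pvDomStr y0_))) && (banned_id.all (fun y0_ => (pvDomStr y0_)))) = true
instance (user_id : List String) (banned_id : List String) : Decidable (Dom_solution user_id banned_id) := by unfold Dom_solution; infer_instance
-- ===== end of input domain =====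

-- B replaces A's recursive DFS over a shared visited bit-array with a level-by-level
-- product building all injective partial assignments, deduplicated by sorted index tuple
-- (objective: alternative decomposition, same count).

-- ===== PORT A =====

-- the loop body of check: 'for i in range(len(user)): …' walked structurally over both char lists
def checkGo (user banned : List Char) : Bool :=
  match user, banned with
  | u :: us, b :: bs => if b = '*' then checkGo us bs else if u ≠ b then false else checkGo us bs
  | _, _ => true

def check (user banned : String) : Bool :=
  if user.toList.length ≠ banned.toList.length then false
  else checkGo user.toList banned.toList

-- dfs(sub, v, visited, stack); the Python tests 'v == len(sub)' and is only ever called with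
-- v ≤ len(sub), where '==' and the '≤' written here (a totality/termination guard) coincide.
def dfsA (sub : List (List Int)) (v : Nat) (visited : List Int) (stack : PySem.Set (List Int)) :
    PySem.Set (List Int) :=
  if _h : sub.length ≤ v then PySem.Set.add stack visited
  else
    (sub.getD v []).foldl
      (fun st i =>
        if PySem.List.pyGetD visited i (0 : Int) = 0 then   -- 'if not visited[i]' (i always in range)
          -- 'visited[i] = 1; dfs(...); visited[i] = 0': the mutation is local to the recursive call
          dfsA sub (v + 1) (PySem.List.pySetD visited i 1) st
        else st)
      stack
  termination_by sub.length - v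
  decreasing_by omega

def solution (user_id : List String) (banned_id : List String) : Int :=
  -- 1) sub 만들기
  let sub := (PySem.List.pyRange 0 banned_id.length 1).foldl (fun acc i =>
      acc ++ [(PySem.List.pyRange 0 user_id.length 1).foldl (fun temp j =>
          if check (PySem.List.pyGetD user_id j "") (PySem.List.pyGetD banned_id i "")
          then temp ++ [j] else temp) []]) []
  -- 2) dfs
  let stack := dfsA sub 0 (List.replicate user_id.length (0 : Int)) PySem.Set.empty
  (stack.length : Int)

-- ===== PORT B =====

def matchesB (user banned : String) : Bool :=
  user.toList.length == banned.toList.length &&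
    (user.toList.zip banned.toList).all (fun p => p.2 == '*' || p.1 == p.2)

def solution_alt (user_id : List String) (banned_id : List String) : Int :=
  let subs := banned_id.map (fun b =>
    ((PySem.List.enumerate user_id).filter (fun p => matchesB p.2 b)).map (fun p => p.1))
  -- level-by-level product with pruning: every partial combo keeps distinct indices
  let combos := subs.foldl (fun cs cand =>
    cs.flatMap (fun c => (cand.filter (fun j => !c.contains j)).map (fun j => c ++ [j]))) [[]]
  -- an injective combo is identified by its index set -> canonical sorted tuple
  ((PySem.Set.ofList (combos.map (fun c => PySem.List.sorted c (fun x => x) false))).length : Int)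

-- ===== PRECONDITION & SPEC =====
def Spec_solution (user_id : List String) (banned_id : List String) (out : Int) : Prop := out = solution_alt user_id banned_id
instance (user_id : List String) (banned_id : List String) (out : Int) : Decidable (Spec_solution user_id banned_id out) := by unfold Spec_solution; infer_instance

-- ===== CLAIM (what is proved, stated in full; the proofs are below) =====
def Claim_equal_solution : Prop := ∀ (user_id : List String) (banned_id : List String), Dom_solution user_id banned_id → Spec_solution user_id banned_id (solution user_id banned_id)

-- ===== LEMMAS AND PROOFS =====

-- The common DFS-order enumeration of all injective assignments extending prefix c.
def pvExt (levels : List (List Int)) (c : List Int) : List (List Int) :=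
  match levels with
  | [] => [c]
  | cand :: rest => (cand.filter (fun j => !c.contains j)).flatMap (fun j => pvExt rest (c ++ [j]))

-- the occupied bit-vector of an index list (what A's visited array is)
def pvBv (n : Nat) (c : List Int) : List Int :=
  (List.range n).map (fun (k : Nat) => if c.contains ((k : Int)) then (1 : Int) else 0)

lemma checkGo_eq_all (us bs : List Char) :
    checkGo us bs = (us.zip bs).all (fun p => p.2 == '*' || p.1 == p.2) := by
  induction us generalizing bs with
  | nil => cases bs <;> simp [checkGo]
  | cons u ut ih =>
    cases bs with
    | nil => simp [checkGo]
    | cons b bt =>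
      by_cases hb : b = '*'
      · simp [checkGo, hb, ih]
      · by_cases hu : u = b <;> simp [checkGo, hb, hu, ih]

lemma check_eq_matchesB (u b : String) : check u b = matchesB u b := by
  unfold check matchesB
  by_cases h : u.toList.length = b.toList.length
  · simp [h, checkGo_eq_all]
  · have h' : ¬ u.length = b.length := by
      simpa using h
    simp [h']

lemma foldl_flatMap {α β : Type} (l : List α) (g : α → List β)
    (f : PySem.Set (List Int) → β → PySem.Set (List Int)) (b : PySem.Set (List Int)) :
    (l.flatMap g).foldl f b = l.foldl (fun b x => (g x).foldl f b) b := by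
  induction l generalizing b with
  | nil => rfl
  | cons x xs ih => simp [List.foldl_append, ih]

-- B's level-by-level foldl builds exactly pvExt
lemma bfs_eq_ext (levels : List (List Int)) (cs : List (List Int)) :
    levels.foldl (fun cs cand =>
      cs.flatMap (fun c => (cand.filter (fun j => !c.contains j)).map (fun j => c ++ [j]))) cs
    = cs.flatMap (pvExt levels) := by
  induction levels generalizing cs with
  | nil => simp [pvExt]
  | cons cand rest ih =>
    rw [List.foldl_cons, ih]
    simp only [pvExt, List.flatMap_assoc, List.flatMap_map]

lemma pvBv_nil (n : Nat) : pvBv n [] = List.replicate n 0 := by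
  simp [pvBv, List.map_const']

lemma pyGetD_pvBv (n : Nat) (c : List Int) (i : Int) (h0 : 0 ≤ i) (h1 : i < n) :
    PySem.List.pyGetD (pvBv n c) i (0 : Int) = if c.contains i then 1 else 0 := by
  have hlen : (pvBv n c).length = n := by simp [pvBv]
  rw [PySem.List.pyGetD_eq_getElem _ _ h0 (by omega : i < ((pvBv n c).length : Int))]
  simp only [pvBv, List.getElem_map, List.getElem_range]
  rw [Int.toNat_of_nonneg h0]

lemma pySetD_pvBv (n : Nat) (c : List Int) (i : Int) (h0 : 0 ≤ i) (_h1 : i < n) :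
    PySem.List.pySetD (pvBv n c) i (1 : Int) = pvBv n (c ++ [i]) := by
  rw [PySem.List.pySetD_of_nonneg _ _ h0]
  apply List.ext_getElem
  · simp [pvBv]
  · intro k hk hk'
    have hkn : k < n := by simpa [pvBv] using hk'
    rw [List.getElem_set]
    simp only [pvBv, List.getElem_map, List.getElem_range]
    by_cases hki : i.toNat = k
    · have : (k : Int) = i := by omega
      simp [hki, this]
    · have : (k : Int) ≠ i := by omega
      simp [hki, this]

-- A's dfs is the fold of Set.add ∘ pvBv over pvExt, in the same order
lemma dfsA_eq_ext (sub : List (List Int)) (n : Nat)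
    (hb : ∀ l ∈ sub, ∀ i ∈ l, 0 ≤ i ∧ i < n) :
    ∀ (k v : Nat), sub.length - v ≤ k → ∀ (c : List Int) (stack : PySem.Set (List Int)),
    dfsA sub v (pvBv n c) stack
      = (pvExt (sub.drop v) c).foldl (fun st d => PySem.Set.add st (pvBv n d)) stack := by
  intro k
  induction k with
  | zero =>
    intro v hv c stack
    have hle : sub.length ≤ v := by omega
    rw [dfsA, List.drop_eq_nil_of_le hle]
    simp [hle, pvExt]
  | succ k ih =>
    intro v hv c stack
    by_cases hle : sub.length ≤ v
    · rw [dfsA, List.drop_eq_nil_of_le hle]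
      simp [hle, pvExt]
    · have hvlt : v < sub.length := by omega
      rw [dfsA]
      simp only [dif_neg hle]
      rw [List.getD_eq_getElem sub [] hvlt, List.drop_eq_getElem_cons hvlt]
      show _ = (pvExt (sub[v] :: sub.drop (v+1)) c).foldl _ stack
      rw [pvExt, foldl_flatMap, ← PySem.List.foldl_if_eq_foldl_filter]
      apply PySem.List.foldl_congr_mem
      intro st i hi
      have hmem : sub[v] ∈ sub := List.getElem_mem hvlt
      obtain ⟨hi0, hin⟩ := hb _ hmem _ hi
      rw [pyGetD_pvBv n c i hi0 hin]
      by_cases hc : i ∈ c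
      · have hcc : c.contains i = true := by simpa using hc
        simp [hc]
      · have hcc : c.contains i = false := by simpa using hc
        simp only [hcc, Bool.not_false, Bool.false_eq_true, if_false, if_true]
        rw [pySetD_pvBv n c i hi0 hin]
        exact ih (v + 1) (by omega) (c ++ [i]) st

-- counting: two dedup folds over the same list agree in length when the two keys
-- identify the same elements
lemma foldl_add_length_eq (f g : List Int → List Int) (P : List Int → Prop)
    (h : ∀ a b, P a → P b → (f a = f b ↔ g a = g b)) :
    ∀ (ds : List (List Int)), (∀ d ∈ ds, P d) →
    ∀ (rs : List (List Int)), (∀ r ∈ rs, P r) →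
    (ds.foldl (fun s d => PySem.Set.add s (f d)) (rs.map f)).length
      = (ds.foldl (fun s d => PySem.Set.add s (g d)) (rs.map g)).length := by
  intro ds
  induction ds with
  | nil => intro _ rs _; simp
  | cons d ds ih =>
    intro hds rs hrs
    have hPd : P d := hds d (by simp)
    have hmem_iff : f d ∈ rs.map f ↔ g d ∈ rs.map g := by
      simp only [List.mem_map]
      constructor
      · rintro ⟨r, hr, hfr⟩; exact ⟨r, hr, (h r d (hrs r hr) hPd).mp hfr⟩
      · rintro ⟨r, hr, hgr⟩; exact ⟨r, hr, (h r d (hrs r hr) hPd).mpr hgr⟩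
    simp only [List.foldl_cons]
    by_cases hm : f d ∈ rs.map f
    · rw [PySem.Set.add_of_mem hm, PySem.Set.add_of_mem (hmem_iff.mp hm)]
      exact ih (fun x hx => hds x (by simp [hx])) rs hrs
    · rw [PySem.Set.add_of_not_mem hm, PySem.Set.add_of_not_mem (fun hgm => hm (hmem_iff.mpr hgm))]
      have hf : rs.map f ++ [f d] = (rs ++ [d]).map f := by simp
      have hg : rs.map g ++ [g d] = (rs ++ [d]).map g := by simp
      rw [hf, hg]
      exact ih (fun x hx => hds x (by simp [hx])) (rs ++ [d])
        (fun r hr => by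
          rcases List.mem_append.mp hr with h' | h'
          · exact hrs r h'
          · simp at h'; subst h'; exact hPd)

lemma pvExt_sound (n : Nat) : ∀ (levels : List (List Int)),
    (∀ l ∈ levels, ∀ i ∈ l, 0 ≤ i ∧ i < n) →
    ∀ (c : List Int), c.Nodup → (∀ i ∈ c, 0 ≤ i ∧ i < n) →
    ∀ d ∈ pvExt levels c, d.Nodup ∧ ∀ i ∈ d, 0 ≤ i ∧ i < n := by
  intro levels
  induction levels with
  | nil =>
    intro _ c hnd hbc d hd
    simp only [pvExt, List.mem_singleton] at hd
    subst hd; exact ⟨hnd, hbc⟩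
  | cons cand rest ih =>
    intro hlev c hnd hbc d hd
    simp only [pvExt, List.mem_flatMap, List.mem_filter] at hd
    obtain ⟨j, ⟨hjc, hjn⟩, hd⟩ := hd
    have hjnc : j ∉ c := by simpa using hjn
    refine ih (fun l hl => hlev l (by simp [hl])) (c ++ [j])
      (by
        refine List.Nodup.append hnd (List.nodup_singleton j) ?_
        intro a ha haj
        have haj' : a = j := by simpa using haj
        exact hjnc (haj' ▸ ha))
      (fun i hi => by
        rcases List.mem_append.mp hi with h' | h'
        · exact hbc i h'
        · have h'' : i = j := by simpa using h'
          exact h'' ▸ hlev cand (by simp) j hjc) d hd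

lemma key_iff (n : Nat) (a b : List Int)
    (ha : a.Nodup ∧ ∀ i ∈ a, 0 ≤ i ∧ i < n) (hb : b.Nodup ∧ ∀ i ∈ b, 0 ≤ i ∧ i < n) :
    pvBv n a = pvBv n b ↔ PySem.List.sorted a (fun x => x) false = PySem.List.sorted b (fun x => x) false := by
  obtain ⟨hna, hba⟩ := ha
  obtain ⟨hnb, hbb⟩ := hb
  have hmem : (pvBv n a = pvBv n b ↔ ∀ x, x ∈ a ↔ x ∈ b) := by
    constructor
    · intro he x
      have key : ∀ (u v : List Int), (∀ i ∈ u, 0 ≤ i ∧ i < n) → pvBv n u = pvBv n v →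
          x ∈ u → x ∈ v := by
        intro u v hu he hx
        obtain ⟨hx0, hxn⟩ := hu x hx
        have hk : x.toNat < n := by omega
        have hlt : x.toNat < (pvBv n u).length := by
          simp only [pvBv, List.length_map, List.length_range]; exact hk
        have this' := List.getElem_of_eq he hlt
        simp only [pvBv, List.getElem_map, List.getElem_range] at this'
        have hxx : ((x.toNat : Nat) : Int) = x := by omega
        rw [hxx] at this'
        have hcu : u.contains x = true := by simpa using hx
        rw [hcu, if_pos rfl] at this'
        by_cases hcv : v.contains x
        · simpa using hcv
        · rw [if_neg hcv] at this'; omega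
      exact ⟨fun hx => key a b hba he hx, fun hx => key b a hbb he.symm hx⟩
    · intro hx
      unfold pvBv
      apply List.map_congr_left
      intro k _
      have : a.contains (k : Int) = b.contains (k : Int) := by
        by_cases hk : (k : Int) ∈ a
        · have hkb : (k : Int) ∈ b := (hx _).mp hk
          simp [hk, hkb]
        · have hkb : (k : Int) ∉ b := fun h => hk ((hx _).mpr h)
          simp [hk, hkb]
      rw [this]
  rw [hmem]
  constructor
  · intro hx
    exact PySem.List.sorted_eq_sorted_of_perm a b (fun x => x) (fun _ _ h => h)
      ((List.perm_ext_iff_of_nodup hna hnb).mpr hx)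
  · intro hs x
    constructor
    · intro hx
      have hmx : x ∈ PySem.List.sorted a (fun x => x) false :=
        (PySem.List.mem_sorted a _ false x).mpr hx
      rw [hs] at hmx
      exact (PySem.List.mem_sorted b _ false x).mp hmx
    · intro hx
      have hmx : x ∈ PySem.List.sorted b (fun x => x) false :=
        (PySem.List.mem_sorted b _ false x).mpr hx
      rw [← hs] at hmx
      exact (PySem.List.mem_sorted a _ false x).mp hmx

-- the two builds of sub/subs coincide
lemma subs_eq (user_id banned_id : List String) :
    (PySem.List.pyRange 0 banned_id.length 1).foldl (fun acc i =>
      acc ++ [(PySem.List.pyRange 0 user_id.length 1).foldl (fun temp j =>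
          if check (PySem.List.pyGetD user_id j "") (PySem.List.pyGetD banned_id i "")
          then temp ++ [j] else temp) []]) []
    = banned_id.map (fun b =>
        ((PySem.List.enumerate user_id).filter (fun p => matchesB p.2 b)).map (fun p => p.1)) := by
  rw [PySem.List.foldl_append_singleton_eq_map]
  rw [List.nil_append]
  have hinner : ∀ s : String,
      ((PySem.List.enumerate user_id).filter (fun p => matchesB p.2 s)).map (fun p => p.1)
      = (PySem.List.pyRange 0 (user_id.length) 1).filter
          (fun j => check (PySem.List.pyGetD user_id j "") s) := by
    intro s
    rw [PySem.List.enumerate_eq_map_pyRange user_id ""]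
    rw [List.filter_map, List.map_map]
    simp only [Function.comp_def, check_eq_matchesB, PySem.List.len_eq]
    simp [List.map_id']
  have houter : banned_id
      = (PySem.List.pyRange 0 (banned_id.length : Int) 1).map
          (fun i => PySem.List.pyGetD banned_id i "") := by
    rw [PySem.List.map_pyGetD_pyRange_zero']
  conv_rhs => rw [houter, List.map_map]
  apply List.map_congr_left
  intro i _
  rw [Function.comp_apply, hinner]
  rw [PySem.List.foldl_append_if_eq_filter, List.nil_append]

lemma subs_bounded (user_id banned_id : List String) :
    ∀ l ∈ banned_id.map (fun b =>
        ((PySem.List.enumerate user_id).filter (fun p => matchesB p.2 b)).map (fun p => p.1)),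
      ∀ i ∈ l, 0 ≤ i ∧ i < (user_id.length : Int) := by
  intro l hl i hi
  simp only [List.mem_map] at hl
  obtain ⟨b, _, hfb⟩ := hl
  subst hfb
  simp only [List.mem_map, List.mem_filter] at hi
  obtain ⟨p, ⟨hp, _⟩, hp1⟩ := hi
  rw [PySem.List.mem_enumerate_iff] at hp
  obtain ⟨k, hk, hpk⟩ := hp
  subst hpk
  subst hp1
  constructor <;> simp <;> omega

-- ===== VERDICT (by name: the statement is the Claim_ definition above) =====
theorem solution_spec : Claim_equal_solution := by
  intro user_id banned_id _
  unfold Spec_solution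
  simp only [solution, solution_alt]
  rw [subs_eq]
  set subsB := banned_id.map (fun b =>
    ((PySem.List.enumerate user_id).filter (fun p => matchesB p.2 b)).map (fun p => p.1)) with hsubs
  have hb := subs_bounded user_id banned_id
  rw [← hsubs] at hb
  have hA : dfsA subsB 0 (List.replicate user_id.length (0 : Int)) PySem.Set.empty
      = (pvExt subsB []).foldl (fun st d => PySem.Set.add st (pvBv user_id.length d)) [] := by
    rw [← pvBv_nil]
    have := dfsA_eq_ext subsB user_id.length hb subsB.length 0 (by omega) [] PySem.Set.empty
    simpa using this
  have hB : subsB.foldl (fun cs cand =>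
      cs.flatMap (fun c => (cand.filter (fun j => !c.contains j)).map (fun j => c ++ [j]))) [[]]
      = pvExt subsB [] := by
    rw [bfs_eq_ext]; simp
  rw [hA, hB]
  rw [PySem.Set.ofList_eq_foldl, List.foldl_map]
  have hcount := foldl_add_length_eq (pvBv user_id.length)
    (fun c => PySem.List.sorted c (fun x => x) false)
    (fun c => c.Nodup ∧ ∀ i ∈ c, 0 ≤ i ∧ i < (user_id.length : Int))
    (fun a b ha hb => key_iff user_id.length a b ha hb)
    (pvExt subsB [])
    (pvExt_sound user_id.length subsB hb [] (by simp) (by simp))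
    [] (by simp)
  simpa using hcount
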